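-- pv_equiv track=rewrite | github.com/unipi-dii-compressedarith/ppu | scripts/tb_gen_pipelined_long.py | generate_gray_list
-- ===== SOURCE A (Python) =====
-- def generate_gray_list(my_val):
--     if my_val <= 0:
--         return
--     my_list = list()
--     my_list.append("0")
--     my_list.append("1")
--     i = 2
--     j = 0
--     while True:
--         if i >= 1 << my_val:
--             break
--         for j in range(i - 1, -1, -1):
--             my_list.append(my_list[j])
--         for j in range(i):
--             my_list[j] = "0" + my_list[j]
--         for j in range(i, 2 * i):
--             my_list[j] = "1" + my_list[j]
--         i = i << 1
--
--     for seq in my_list: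
--         yield int(seq, 2)
-- ===== SOURCE B (Python) =====
-- def generate_gray_list(my_val):
--     # Direct closed form: the k-th reflected Gray code is k ^ (k >> 1).
--     if my_val <= 0:
--         return
--     for i in range(1 << my_val):
--         yield i ^ (i >> 1)
-- ===== Notes on version B (the rewrite author's own statement) =====
-- stated objective: faster
-- what changed: Replaces the reflect-and-prefix construction of binary strings (doubling a string list and re-parsing each string with int(seq,2)) by yielding the closed form i ^ (i >> 1) for i in range(1 << my_val).
import Mathlib
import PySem

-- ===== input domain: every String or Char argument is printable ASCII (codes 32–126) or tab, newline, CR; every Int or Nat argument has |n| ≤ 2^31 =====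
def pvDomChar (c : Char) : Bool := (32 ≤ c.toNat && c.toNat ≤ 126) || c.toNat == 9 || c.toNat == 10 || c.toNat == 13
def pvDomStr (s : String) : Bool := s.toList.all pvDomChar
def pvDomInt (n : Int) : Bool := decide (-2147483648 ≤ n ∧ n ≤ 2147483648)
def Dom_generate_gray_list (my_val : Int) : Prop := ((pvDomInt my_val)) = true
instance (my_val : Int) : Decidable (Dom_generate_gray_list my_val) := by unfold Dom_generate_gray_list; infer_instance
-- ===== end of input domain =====

-- B replaces A's reflect-and-prefix construction of binary strings by the closed form i ^ (i >> 1).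

-- ===== PORT A =====
-- int(seq, 2): exact here because every string A builds consists only of '0'/'1' characters
def binVal (s : String) : Int :=
  s.toList.foldl (fun a c => a * 2 + (if c = '1' then 1 else 0)) 0

-- one iteration of A's while-loop body (the three inner for-loops, transliterated)
def grayBody (l : List String) (i : Int) : List String :=
  (PySem.List.pyRange i (2 * i) 1).foldl
    (fun acc j => acc.set j.toNat ("1" ++ PySem.List.pyGetD acc j ""))
    ((PySem.List.pyRange 0 i 1).foldl
      (fun acc j => acc.set j.toNat ("0" ++ PySem.List.pyGetD acc j ""))
      ((PySem.List.pyRange (i - 1) (-1) (-1)).foldl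
        (fun acc j => acc ++ [PySem.List.pyGetD acc j ""]) l))

-- A's 'while True: if i >= 1 << my_val: break; …; i = i << 1'
-- (the 'i ≤ 0' disjunct is a totality guard only: A always enters the loop with i = 2 > 0)
def grayLoop (bound : Int) (l : List String) (i : Int) : List String :=
  if h : bound ≤ i ∨ i ≤ 0 then l
  else grayLoop bound (grayBody l i) (i * 2)
termination_by (bound - i).toNat
decreasing_by omega

def generate_gray_list (my_val : Int) : List Int :=
  if my_val ≤ 0 then []
  else (grayLoop ((2 : Int) ^ my_val.toNat) ["0", "1"] 2).map binVal

-- ===== PORT B =====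
def generate_gray_list_alt (my_val : Int) : List Int :=
  if my_val ≤ 0 then []
  else (List.range (2 ^ my_val.toNat)).map (fun i => ((i ^^^ (i >>> 1) : Nat) : Int))

-- ===== PRECONDITION & SPEC =====
def Spec_generate_gray_list (my_val : Int) (out : List Int) : Prop := out = generate_gray_list_alt my_val
instance (my_val : Int) (out : List Int) : Decidable (Spec_generate_gray_list my_val out) := by unfold Spec_generate_gray_list; infer_instance

-- ===== CLAIM (what is proved, stated in full; the proofs are below) =====
def Claim_equal_generate_gray_list : Prop := ∀ (my_val : Int), Dom_generate_gray_list my_val → Spec_generate_gray_list my_val (generate_gray_list my_val)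

-- ===== LEMMAS AND PROOFS =====

-- the Gray sequence of width k, as naturals
def grayN (k : Nat) : List Nat := (List.range (2 ^ k)).map (fun i => i ^^^ (i / 2))

-- the invariant of A's while loop at i = 2^k
def GrayInv (k : Nat) (l : List String) : Prop :=
  (∀ s ∈ l, s.toList.length = k) ∧ l.map binVal = (grayN k).map (fun (n : Nat) => (n : Int))

-- reflection property of the Gray code
lemma gray_reflect (k j : Nat) (hj : j < 2 ^ k) :
    (2 ^ k + j) ^^^ ((2 ^ k + j) / 2) = 2 ^ k + ((2 ^ k - 1 - j) ^^^ ((2 ^ k - 1 - j) / 2)) := by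
  have hrw : 2 ^ k - 1 - j = 2 ^ k - (j + 1) := by omega
  have hr : 2 ^ k - 1 - j < 2 ^ k := by have : 0 < 2 ^ k := Nat.two_pow_pos k; omega
  have hX : ((2 ^ k - 1 - j) ^^^ ((2 ^ k - 1 - j) / 2)) < 2 ^ k :=
    Nat.xor_lt_two_pow hr (lt_of_le_of_lt (Nat.div_le_self _ _) hr)
  -- bits of the left number
  have tA : ∀ t, (2 ^ k + j).testBit t = (decide (t < k) && j.testBit t || decide (t = k)) := by
    intro t
    rcases lt_trichotomy t k with h | h | h
    · simp [Nat.testBit_two_pow_add_gt h, h, Nat.ne_of_lt h]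
    · subst h
      simp [Nat.testBit_two_pow_add_eq, Nat.testBit_lt_two_pow hj]
    · have hlt : 2 ^ k + j < 2 ^ t := by
        calc 2 ^ k + j < 2 ^ k + 2 ^ k := by omega
        _ = 2 ^ (k + 1) := by ring
        _ ≤ 2 ^ t := Nat.pow_le_pow_right (by norm_num) h
      simp [Nat.testBit_lt_two_pow hlt, Nat.lt_asymm h, Nat.ne_of_gt h]
  -- bits of the right number
  have tB : ∀ t, (2 ^ k + ((2 ^ k - 1 - j) ^^^ ((2 ^ k - 1 - j) / 2))).testBit t
      = (decide (t < k) && ((2 ^ k - 1 - j) ^^^ ((2 ^ k - 1 - j) / 2)).testBit t || decide (t = k)) := by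
    intro t
    rcases lt_trichotomy t k with h | h | h
    · simp [Nat.testBit_two_pow_add_gt h, h, Nat.ne_of_lt h]
    · subst h
      simp [Nat.testBit_two_pow_add_eq, Nat.testBit_lt_two_pow hX]
    · have hlt : 2 ^ k + ((2 ^ k - 1 - j) ^^^ ((2 ^ k - 1 - j) / 2)) < 2 ^ t := by
        calc 2 ^ k + ((2 ^ k - 1 - j) ^^^ ((2 ^ k - 1 - j) / 2)) < 2 ^ k + 2 ^ k := by omega
        _ = 2 ^ (k + 1) := by ring
        _ ≤ 2 ^ t := Nat.pow_le_pow_right (by norm_num) h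
      simp [Nat.testBit_lt_two_pow hlt, Nat.lt_asymm h, Nat.ne_of_gt h]
  have tR : ∀ t, (2 ^ k - 1 - j).testBit t = (decide (t < k) && !j.testBit t) := by
    intro t; rw [hrw]; exact Nat.testBit_two_pow_sub_succ hj t
  apply Nat.eq_of_testBit_eq
  intro b
  rw [Nat.testBit_xor, Nat.testBit_div_two, tA, tA, tB, Nat.testBit_xor, Nat.testBit_div_two, tR, tR]
  rcases lt_trichotomy (b + 1) k with h | h | h
  · have hb : b < k := by omega
    simp [h, hb, Nat.ne_of_lt h, Nat.ne_of_lt hb]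
  · have hb : b < k := by omega
    simp [h, hb, Nat.ne_of_lt hb]
  · by_cases hb : b = k
    · subst hb
      simp [Nat.lt_asymm h]
    · have hb' : ¬ b < k := by omega
      have hb1 : ¬ b + 1 = k := by omega
      simp [hb', hb, hb1, Nat.lt_asymm h]

lemma grayN_succ (k : Nat) :
    grayN (k + 1) = grayN k ++ (grayN k).reverse.map (fun x => 2 ^ k + x) := by
  unfold grayN
  have h2 : 2 ^ (k + 1) = 2 ^ k + 2 ^ k := by ring
  rw [h2, List.range_add, List.map_append, List.map_map, ← List.map_reverse, List.map_map]
  congr 1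
  apply List.ext_getElem
  · simp
  · intro t ht1 ht2
    simp only [List.getElem_map, List.getElem_range, Function.comp]
    rw [List.getElem_reverse]
    simp only [List.getElem_map, List.getElem_range, List.length_map, List.length_range]
    have ht : t < 2 ^ k := by simpa using ht1
    rw [gray_reflect k t ht]

-- loop 1: appending my_list[j] for j = i-1 … 0
lemma loop1 (d : String) : ∀ (m : Nat) (l : List String), m ≤ l.length → ∀ (acc : List String), l <+: acc →
    (PySem.List.pyRange ((m : Int) - 1) (-1) (-1)).foldl
        (fun acc j => acc ++ [PySem.List.pyGetD acc j d]) acc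
      = acc ++ (l.take m).reverse := by
  intro m
  induction m with
  | zero =>
    intro l _ acc _
    rw [PySem.List.pyRange_neg_one_eq_nil (by norm_num)]
    simp
  | succ m ih =>
    intro l hm acc hpre
    have hml : m < l.length := by omega
    have hma : m < acc.length := lt_of_lt_of_le hml hpre.length_le
    have hcast : ((m + 1 : Nat) : Int) - 1 = (m : Int) := by push_cast; ring
    rw [hcast, PySem.List.pyRange_neg_one_cons (by omega : (-1 : Int) < (m : Int))]
    rw [List.foldl_cons]
    have hget : PySem.List.pyGetD acc (m : Int) d = l[m] := by
      rw [PySem.List.pyGetD_eq_getElem acc d (by positivity) (by exact_mod_cast hma)]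
      simp only [Int.toNat_natCast]
      exact (hpre.getElem hml).symm
    rw [hget]
    have hpre' : l <+: (acc ++ [l[m]]) := hpre.trans (List.prefix_append acc [l[m]])
    rw [ih l (by omega) (acc ++ [l[m]]) hpre']
    rw [List.take_add_one, List.getElem?_eq_getElem hml, Option.toList_some, List.reverse_append]
    simp

-- loops 2/3: in-place map over an index range
lemma foldl_set_range {α : Type} (f : α → α) (d : α) :
    ∀ (n a : Nat) (xs : List α), a + n ≤ xs.length →
    (PySem.List.pyRange (a : Int) ((a : Int) + (n : Int)) 1).foldl
        (fun acc j => acc.set j.toNat (f (PySem.List.pyGetD acc j d))) xs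
      = xs.take a ++ ((xs.drop a).take n).map f ++ xs.drop (a + n) := by
  intro n
  induction n with
  | zero =>
    intro a xs _
    rw [show ((a : Int) + (0 : Nat) : Int) = (a : Int) by push_cast; ring,
        PySem.List.pyRange_one_eq_nil (le_refl _)]
    simp
  | succ n ih =>
    intro a xs h
    have ha : a < xs.length := by omega
    rw [PySem.List.pyRange_one_cons (by push_cast; omega)]
    rw [List.foldl_cons]
    have hget : PySem.List.pyGetD xs (a : Int) d = xs[a] := by
      rw [PySem.List.pyGetD_eq_getElem xs d (by positivity) (by exact_mod_cast ha)]
      simp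
    rw [hget]
    simp only [Int.toNat_natCast]
    have hset : xs.set a (f xs[a]) = xs.take a ++ f xs[a] :: xs.drop (a + 1) := by
      rw [List.set_eq_take_append_cons_drop]
      simp [ha]
    have hrec := ih (a + 1) (xs.set a (f xs[a])) (by simp; omega)
    rw [show ((a : Int) + 1 : Int) = ((a + 1 : Nat) : Int) by push_cast; ring,
        show ((a : Int) + ((n + 1 : Nat) : Int)) = (((a + 1 : Nat) : Int) + (n : Nat)) by push_cast; ring]
    rw [hrec]
    rw [hset]
    have hta : (xs.take a).length = a := by simp [Nat.min_eq_left (le_of_lt ha)]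
    have h1 : (xs.take a ++ f xs[a] :: xs.drop (a + 1)).take (a + 1) = xs.take a ++ [f xs[a]] := by
      rw [List.take_append, hta, List.take_take]
      simp
    have h2 : (xs.take a ++ f xs[a] :: xs.drop (a + 1)).drop (a + 1) = xs.drop (a + 1) := by
      rw [List.drop_append, hta, List.drop_eq_nil_of_le (by simp [hta] : (xs.take a).length ≤ a + 1)]
      simp
    have h3 : (xs.take a ++ f xs[a] :: xs.drop (a + 1)).drop (a + 1 + n) = xs.drop (a + 1 + n) := by
      rw [List.drop_append, hta, List.drop_eq_nil_of_le (by rw [hta]; omega : (xs.take a).length ≤ a + 1 + n)]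
      rw [show a + 1 + n - a = n + 1 by omega]
      simp [List.drop_drop]
    have h4 : (xs.drop a).take (n + 1) = xs[a] :: (xs.drop (a + 1)).take n := by
      rw [List.drop_eq_getElem_cons ha, List.take_succ_cons]
    rw [h1, h2, h3, h4]
    simp [List.append_assoc, show a + 1 + n = a + (n + 1) from by omega]

lemma grayBody_eq (l : List String) :
    grayBody l (l.length : Int)
      = l.map (fun s => "0" ++ s) ++ l.reverse.map (fun s => "1" ++ s) := by
  unfold grayBody
  rw [loop1 "" l.length l (le_refl _) l (List.prefix_refl l), List.take_length]
  have hlen2 : (l ++ l.reverse).length = l.length + l.length := by simp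
  have e2 := foldl_set_range (fun s => "0" ++ s) "" l.length 0 (l ++ l.reverse) (by omega)
  beta_reduce at e2
  rw [show ((0 : Nat) : Int) + (l.length : Int) = (l.length : Int) by push_cast; ring,
      show ((0 : Nat) : Int) = (0 : Int) by norm_num] at e2
  rw [e2]
  simp only [List.take_zero, List.drop_zero, List.nil_append, Nat.zero_add]
  rw [List.take_left' rfl, List.drop_left' rfl]
  have hlenf : (l.map (fun s => "0" ++ s)).length = l.length := by simp
  have e3 := foldl_set_range (fun s => "1" ++ s) "" l.length l.length
      (l.map (fun s => "0" ++ s) ++ l.reverse) (by simp)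
  beta_reduce at e3
  rw [show ((l.length : Nat) : Int) + (l.length : Int) = 2 * (l.length : Int) by push_cast; ring] at e3
  rw [e3]
  rw [List.take_left' hlenf, List.drop_left' hlenf,
      List.drop_eq_nil_of_le (by simp), List.take_of_length_le (by simp)]
  simp

lemma binfold : ∀ (cs : List Char) (a : Int),
    cs.foldl (fun x c => x * 2 + (if c = '1' then 1 else 0)) a
      = a * 2 ^ cs.length + cs.foldl (fun x c => x * 2 + (if c = '1' then 1 else 0)) 0 := by
  intro cs
  induction cs with
  | nil => intro a; simp
  | cons c cs ih =>
    intro a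
    simp only [List.foldl_cons, List.length_cons]
    rw [ih (a * 2 + _), ih (0 * 2 + _)]
    ring

lemma binVal_cons0 (s : String) : binVal ("0" ++ s) = binVal s := by
  simp [binVal, String.toList_append, show "0".toList = ['0'] from rfl]

lemma binVal_cons1 (s : String) : binVal ("1" ++ s) = 2 ^ s.toList.length + binVal s := by
  unfold binVal
  rw [String.toList_append, show "1".toList = ['1'] from rfl]
  rw [List.cons_append, List.nil_append, List.foldl_cons, binfold]
  norm_num

lemma grayinv_step (k : Nat) (l : List String) (h : GrayInv k l) :
    GrayInv (k + 1) (grayBody l (l.length : Int)) := by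
  obtain ⟨hlen, hval⟩ := h
  rw [grayBody_eq]
  constructor
  · intro s hs
    rcases List.mem_append.1 hs with hs | hs
    · obtain ⟨t, ht, rfl⟩ := List.mem_map.1 hs
      rw [String.toList_append, List.length_append, hlen t ht,
          show "0".toList.length = 1 from rfl]
      omega
    · obtain ⟨t, ht, rfl⟩ := List.mem_map.1 hs
      rw [String.toList_append, List.length_append, hlen t (List.mem_reverse.1 ht),
          show "1".toList.length = 1 from rfl]
      omega
  · rw [List.map_append, grayN_succ, List.map_append]
    congr 1
    · rw [List.map_map]
      have h0 : ∀ s ∈ l, (binVal ∘ fun s => "0" ++ s) s = binVal s := by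
        intro s _
        simpa using binVal_cons0 s
      rw [List.map_congr_left h0, hval]
    · rw [List.map_map]
      have h1 : ∀ s ∈ l.reverse, (binVal ∘ fun s => "1" ++ s) s = (2 : Int) ^ k + binVal s := by
        intro s hs
        have hsk : s.toList.length = k := hlen s (List.mem_reverse.1 hs)
        simp only [Function.comp_apply]
        rw [binVal_cons1, hsk]
      rw [List.map_congr_left h1]
      have h2 : (l.reverse.map (fun s => (2 : Int) ^ k + binVal s))
          = (l.map binVal).reverse.map (fun x => (2 : Int) ^ k + x) := by
        rw [← List.map_reverse, List.map_map]
        rfl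
      rw [h2, hval, ← List.map_reverse, List.map_map, List.map_map]
      apply List.map_congr_left
      intro x _
      simp only [Function.comp_apply]
      push_cast
      ring

lemma grayLoop_length (k : Nat) (l : List String) (h : GrayInv k l) : l.length = 2 ^ k := by
  have := congrArg List.length h.2
  simpa [grayN] using this

lemma loop_inv : ∀ (d k : Nat) (l : List String), GrayInv k l →
    GrayInv (k + d) (grayLoop ((2 : Int) ^ (k + d)) l ((2 : Int) ^ k)) := by
  intro d
  induction d with
  | zero =>
    intro k l h
    rw [grayLoop]
    simp only [Nat.add_zero, le_refl, true_or, dite_true]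
    exact h
  | succ d ih =>
    intro k l h
    have hpow : (2 : Int) ^ k < 2 ^ (k + (d + 1)) := by
      apply pow_lt_pow_right₀ (by norm_num)
      omega
    have hpos : (0 : Int) < 2 ^ k := by positivity
    rw [grayLoop, dif_neg (by push_neg; constructor <;> omega)]
    have hl : (l.length : Int) = (2 : Int) ^ k := by
      rw [grayLoop_length k l h]
      push_cast
      ring
    have hstep := grayinv_step k l h
    rw [hl] at hstep
    have := ih (k + 1) (grayBody l ((2 : Int) ^ k)) hstep
    rw [show (2 : Int) ^ k * 2 = 2 ^ (k + 1) by ring,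
        show k + (d + 1) = k + 1 + d by omega]
    exact this

-- ===== VERDICT (by name: the statement is the Claim_ definition above) =====
theorem generate_gray_list_spec : Claim_equal_generate_gray_list := by
  intro my_val _
  unfold Spec_generate_gray_list generate_gray_list generate_gray_list_alt
  by_cases hv : my_val ≤ 0
  · simp [hv]
  · simp only [hv, if_false]
    have hn : 1 ≤ my_val.toNat := by omega
    have hbase : GrayInv 1 ["0", "1"] := by
      constructor
      · decide
      · decide
    have hinv := loop_inv (my_val.toNat - 1) 1 ["0", "1"] hbase
    rw [show 1 + (my_val.toNat - 1) = my_val.toNat by omega,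
        show (2 : Int) ^ 1 = 2 by ring] at hinv
    rw [hinv.2, grayN, List.map_map]
    apply List.map_congr_left
    intro x _
    simp [Nat.shiftRight_one]
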